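-- pv_equiv track=rewrite | github.com/blacknon/websearch | websearch/engine_common.py | create_text_links
-- ===== SOURCE A (Python) =====
-- def create_text_links(elinks, etitles):
--     links = list()
--     n = 0
--     before_link = ""
--     for link in elinks:
--         if len(etitles) > n:
--             d = {"link": link, "title": etitles[n]}
--         else:
--             d = {"link": link}
--
--         if before_link != link:
--             links.append(d)
--
--         before_link = link
--         n += 1
--     return links
-- ===== SOURCE B (Python) =====
-- def create_text_links(elinks, etitles):
--     # Run-grouping traversal: the outer loop jumps from one run of consecutive
--     # equal links to the next (inner while spans the run), emitting one dict per
--     # run, titled by the run's first position.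
--     out = []
--     i = 0
--     n = len(elinks)
--     while i < n:
--         link = elinks[i]
--         j = i + 1
--         while j < n and elinks[j] == link:
--             j += 1
--         out.append({"link": link, "title": etitles[i]} if i < len(etitles) else {"link": link})
--         i = j
--     return out
-- ===== Notes on version B (the rewrite author's own statement) =====
-- stated objective: alternative
-- what changed: Replaces the stateful sentinel-comparison loop by a run-grouping traversal whose outer loop jumps from run to run of consecutive equal links, emitting one entry per run titled by the run's first index.
-- intended difference: When the first link is the empty string, A's "" sentinel accidentally drops that leading link (returning no entry for its run); B returns an entry for it like for any other first link, which is the intended behaviour since the sentinel is only an implementation artefact. — e.g. on create_text_links(["", "a"], ["t1", "t2"]): A returns [[("link", "a"), ("title", "t2")]], B returns [[("link", ""), ("title", "t1")], [("link", "a"), ("title", "t2")]]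
import Mathlib
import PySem

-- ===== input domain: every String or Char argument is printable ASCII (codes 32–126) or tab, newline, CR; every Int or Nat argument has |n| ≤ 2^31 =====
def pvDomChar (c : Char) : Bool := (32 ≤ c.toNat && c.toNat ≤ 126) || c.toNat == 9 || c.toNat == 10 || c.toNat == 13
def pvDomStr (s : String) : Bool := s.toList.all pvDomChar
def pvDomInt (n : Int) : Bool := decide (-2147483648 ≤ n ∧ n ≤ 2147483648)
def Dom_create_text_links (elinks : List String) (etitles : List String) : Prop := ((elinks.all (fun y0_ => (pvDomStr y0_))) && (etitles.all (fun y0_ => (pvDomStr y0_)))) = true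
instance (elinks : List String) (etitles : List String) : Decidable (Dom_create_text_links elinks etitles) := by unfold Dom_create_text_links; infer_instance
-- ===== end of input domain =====

-- B replaces A's sentinel loop by a run-grouping traversal (outer loop over runs of equal links) (alternative decomposition,
-- same cost); on a leading empty-string link A's sentinel drops it while B keeps it (see D_ below).

-- ===== PORT A =====
def create_text_links (elinks : List String) (etitles : List String) : List (List (String × String)) :=
  (elinks.foldl
    (fun (st : List (List (String × String)) × Nat × String) link =>
      let d := if etitles.length > st.2.1 then
          [("link", link), ("title", etitles.getD st.2.1 "")]
        else [("link", link)]
      ((if st.2.2 ≠ link then st.1 ++ [d] else st.1), st.2.1 + 1, link))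
    (([] : List (List (String × String))), (0 : Nat), "")).1

-- ===== PORT B =====
-- span of the run: (number of further links equal to `link`, remainder) — Source B's while-loop
def spanRun (link : String) : List String → Nat × List String
  | [] => (0, [])
  | x :: xs => if x = link then ((spanRun link xs).1 + 1, (spanRun link xs).2) else (0, x :: xs)

lemma spanRun_length_le (link : String) : ∀ xs : List String, (spanRun link xs).2.length ≤ xs.length
  | [] => by simp [spanRun]
  | x :: xs => by
    by_cases h : x = link
    · simpa [spanRun, h] using Nat.le_succ_of_le (spanRun_length_le link xs)
    · simp [spanRun, h]

def ctlGo (etitles : List String) : List String → Nat → List (List (String × String))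
  | [], _ => []
  | link :: xs, i =>
    let d := if i < etitles.length then [("link", link), ("title", etitles.getD i "")]
      else [("link", link)]
    d :: ctlGo etitles (spanRun link xs).2 (i + (spanRun link xs).1 + 1)
termination_by xs => xs.length
decreasing_by simpa using Nat.lt_succ_of_le (spanRun_length_le link xs)

def create_text_links_alt (elinks : List String) (etitles : List String) : List (List (String × String)) :=
  ctlGo etitles elinks 0

-- ===== PRECONDITION & SPEC =====
-- When the first link is "", A's "" sentinel accidentally drops that leading link; B returns an
-- entry for it like for any other first link, which is the intended behaviour.
def D_create_text_links (elinks : List String) (etitles : List String) : Prop :=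
  elinks.head? = some ""
instance (elinks : List String) (etitles : List String) : Decidable (D_create_text_links elinks etitles) := by unfold D_create_text_links; infer_instance

def Spec_create_text_links (elinks : List String) (etitles : List String) (out : List (List (String × String))) : Prop := ¬ D_create_text_links elinks etitles → out = create_text_links_alt elinks etitles
instance (elinks : List String) (etitles : List String) (out : List (List (String × String))) : Decidable (Spec_create_text_links elinks etitles out) := by unfold Spec_create_text_links; infer_instance

def pvDiffWitness_create_text_links : List String × List String := (["", "a"], ["t1", "t2"])
def pvDiffWitnessOut_create_text_links : (List (List (String × String))) × (List (List (String × String))) :=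
  ([[("link", "a"), ("title", "t2")]],
   [[("link", ""), ("title", "t1")], [("link", "a"), ("title", "t2")]])

-- ===== CLAIM (what is proved, stated in full; the proofs are below) =====
def Claim_unchanged_create_text_links : Prop := ∀ (elinks : List String) (etitles : List String), Dom_create_text_links elinks etitles → Spec_create_text_links elinks etitles (create_text_links elinks etitles)
def Claim_changed_create_text_links : Prop := Dom_create_text_links (pvDiffWitness_create_text_links.1) (pvDiffWitness_create_text_links.2) ∧ D_create_text_links (pvDiffWitness_create_text_links.1) (pvDiffWitness_create_text_links.2) ∧ create_text_links (pvDiffWitness_create_text_links.1) (pvDiffWitness_create_text_links.2) = pvDiffWitnessOut_create_text_links.1 ∧ create_text_links_alt (pvDiffWitness_create_text_links.1) (pvDiffWitness_create_text_links.2) = pvDiffWitnessOut_create_text_links.2 ∧ pvDiffWitnessOut_create_text_links.1 ≠ pvDiffWitnessOut_create_text_links.2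
def Claim_exact_create_text_links : Prop := ∀ (elinks : List String) (etitles : List String), Dom_create_text_links elinks etitles → D_create_text_links elinks etitles → create_text_links elinks etitles ≠ create_text_links_alt elinks etitles

-- ===== LEMMAS AND PROOFS =====

-- the head of spanRun's remainder differs from the run's link
lemma spanRun_head (link : String) : ∀ (xs : List String) (y : String),
    (spanRun link xs).2.head? = some y → y ≠ link
  | [], y => by simp [spanRun]
  | x :: xs, y => by
    by_cases h : x = link
    · simpa [spanRun, h] using spanRun_head link xs y
    · simp [spanRun, h]; rintro rfl; exact h

-- A's step function, named for the lemmas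
def ctlF (etitles : List String) :
    List (List (String × String)) × Nat × String → String →
    List (List (String × String)) × Nat × String :=
  fun st link =>
    let d := if etitles.length > st.2.1 then
        [("link", link), ("title", etitles.getD st.2.1 "")]
      else [("link", link)]
    ((if st.2.2 ≠ link then st.1 ++ [d] else st.1), st.2.1 + 1, link)

lemma create_text_links_eq_foldl (elinks etitles : List String) :
    create_text_links elinks etitles = (elinks.foldl (ctlF etitles) ([], 0, "")).1 := rfl

-- skipping a run: while prev = link, A's loop only increments n
lemma ctl_skip_run (etitles : List String) (link : String) : ∀ (xs : List String)
    (acc : List (List (String × String))) (n : Nat),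
    xs.foldl (ctlF etitles) (acc, n, link)
      = (spanRun link xs).2.foldl (ctlF etitles) (acc, n + (spanRun link xs).1, link)
  | [], acc, n => by simp [spanRun]
  | x :: xs, acc, n => by
    by_cases h : x = link
    · subst h
      have : ctlF etitles (acc, n, x) x = (acc, n + 1, x) := by simp [ctlF]
      rw [List.foldl_cons, this, ctl_skip_run etitles x xs acc (n + 1)]
      simp [spanRun, Nat.add_assoc, Nat.add_comm 1]
    · simp [spanRun, h]

-- main invariant: starting from a state whose prev differs from the head, A's loop equals B's run recursion
lemma ctl_main (etitles : List String) : ∀ (xs : List String)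
    (acc : List (List (String × String))) (n : Nat) (prev : String),
    (∀ y, xs.head? = some y → prev ≠ y) →
    (xs.foldl (ctlF etitles) (acc, n, prev)).1 = acc ++ ctlGo etitles xs n
  | [], acc, n, prev, _ => by simp [ctlGo]
  | l :: ls, acc, n, prev, h => by
    have hne : prev ≠ l := h l rfl
    have hstep : ctlF etitles (acc, n, prev) l
        = (acc ++ [if etitles.length > n then [("link", l), ("title", etitles.getD n "")]
            else [("link", l)]], n + 1, l) := by
      simp [ctlF, hne]
    rw [List.foldl_cons, hstep, ctl_skip_run etitles l ls _ (n + 1),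
      ctl_main etitles (spanRun l ls).2 _ (n + 1 + (spanRun l ls).1) l
        (fun y hy => (spanRun_head l ls y hy).symm)]
    rw [ctlGo]
    simp [Nat.add_assoc, Nat.add_comm 1]
termination_by xs => xs.length
decreasing_by simpa using Nat.lt_succ_of_le (spanRun_length_le l ls)

-- ===== VERDICT (by name: the statement is the Claim_ definition above) =====
theorem create_text_links_spec : Claim_unchanged_create_text_links := by
  intro elinks etitles _ hD
  show create_text_links elinks etitles = create_text_links_alt elinks etitles
  rw [create_text_links_eq_foldl, create_text_links_alt]
  refine ctl_main etitles elinks [] 0 "" ?_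
  intro y hy hcontra
  exact hD (by simpa [D_create_text_links, hy, hcontra])

theorem create_text_links_changed : Claim_changed_create_text_links := by
  unfold Claim_changed_create_text_links
  refine ⟨by decide, by decide, by decide, ?_, by decide⟩
  show create_text_links_alt ["", "a"] ["t1", "t2"] = _
  simp [create_text_links_alt, ctlGo, spanRun, pvDiffWitnessOut_create_text_links]

theorem create_text_links_tight : Claim_exact_create_text_links := by
  intro elinks etitles _ hD
  unfold D_create_text_links at hD
  cases elinks with
  | nil => simp at hD
  | cons a xs =>
    simp at hD; subst hD
    have hA : create_text_links ("" :: xs) etitles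
        = ctlGo etitles (spanRun "" xs).2 ((spanRun "" xs).1 + 1) := by
      rw [create_text_links_eq_foldl, List.foldl_cons]
      have hstep : ctlF etitles ([], 0, "") "" = ([], 1, "") := by simp [ctlF]
      rw [hstep, ctl_skip_run etitles "" xs [] 1,
        ctl_main etitles (spanRun "" xs).2 [] (1 + (spanRun "" xs).1) ""
          (fun y hy => (spanRun_head "" xs y hy).symm)]
      simp [Nat.add_comm]
    have hlen : (create_text_links_alt ("" :: xs) etitles).length
        = (ctlGo etitles (spanRun "" xs).2 ((spanRun "" xs).1 + 1)).length + 1 := by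
      simp [create_text_links_alt, ctlGo]
    intro hEq
    have h1 := congrArg List.length hEq
    rw [hA, hlen] at h1
    omega
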